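-- pv_equiv track=rewrite | github.com/oakleyfoy/rw-tournament-software | backend/app/utils/rr_wiring.py | enforce_top2_last_round
-- ===== SOURCE A (Python) =====
-- from typing import List, Tuple, Dict
-- from collections import defaultdict
--
-- def enforce_top2_last_round(
--     pool_size: int, pairings: List[Tuple[int, int, int, int]]
-- ) -> List[Tuple[int, int, int, int]]:
--     """
--     Post-process RR pairings to ensure positions (1,2) play in the last round.
--
--     Args:
--         pool_size: Number of teams in the pool
--         pairings: List of (round_index, sequence_in_round, idx_a, idx_b) tuples
--                  where idx_a, idx_b are 0-based positions (0 = seed 1, 1 = seed 2, etc.)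
--
--     Returns:
--         Modified pairings list with (1,2) matchup in the last round
--
--     Strategy:
--         - Find the round where (0,1) pairing occurs (positions 0 and 1 = seeds 1 and 2)
--         - Find the last round
--         - Swap the entire round's pairings if needed
--     """
--     if pool_size < 2:
--         return pairings
--
--     # Group pairings by round
--     rounds: Dict[int, List[Tuple[int, int, int, int]]] = defaultdict(list)
--     for pairing in pairings:
--         round_idx = pairing[0]
--         rounds[round_idx].append(pairing)
--
--     # Find which round contains the (0,1) pairing (seeds 1 and 2)
--     round_with_top2 = None
--     last_round = max(rounds.keys()) if rounds else 1
--
--     for round_idx, round_pairings in rounds.items():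
--         for _, _, idx_a, idx_b in round_pairings:
--             # Check if this is the (0,1) or (1,0) pairing
--             if (idx_a == 0 and idx_b == 1) or (idx_a == 1 and idx_b == 0):
--                 round_with_top2 = round_idx
--                 break
--         if round_with_top2 is not None:
--             break
--
--     # If top 2 are already in last round, no swap needed
--     if round_with_top2 == last_round or round_with_top2 is None:
--         return pairings
--
--     # Swap the rounds: move top2 round to last, last round to top2 position
--     top2_round_pairings = rounds[round_with_top2]
--     last_round_pairings = rounds[last_round]
--
--     # Rebuild pairings with swapped rounds
--     # Maintain deterministic ordering: sort rounds, then sort pairings within each round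
--     result: List[Tuple[int, int, int, int]] = []
--     for round_idx in sorted(rounds.keys()):
--         if round_idx == round_with_top2:
--             # Replace with last round pairings, updating round_index to current round_idx
--             # Sort by sequence_in_round for determinism
--             sorted_last = sorted(last_round_pairings, key=lambda x: x[1])
--             for _, seq, idx_a, idx_b in sorted_last:
--                 result.append((round_idx, seq, idx_a, idx_b))
--         elif round_idx == last_round:
--             # Replace with top2 round pairings, updating round_index to current round_idx
--             # Sort by sequence_in_round for determinism
--             sorted_top2 = sorted(top2_round_pairings, key=lambda x: x[1])
--             for _, seq, idx_a, idx_b in sorted_top2: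
--                 result.append((round_idx, seq, idx_a, idx_b))
--         else:
--             # Keep other rounds as-is, sorted by sequence_in_round
--             sorted_round = sorted(rounds[round_idx], key=lambda x: x[1])
--             result.extend(sorted_round)
--
--     return result
-- ===== SOURCE B (Python) =====
-- def enforce_top2_last_round(pool_size, pairings):
--     if pool_size < 2:
--         return pairings
--     # rounds that contain the seeds-1-and-2 matchup
--     matched = {p[0] for p in pairings if (p[2], p[3]) in ((0, 1), (1, 0))}
--     # first (by first occurrence in the list) such round
--     top2 = next((p[0] for p in pairings if p[0] in matched), None)
--     if top2 is None:
--         return pairings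
--     last = max(p[0] for p in pairings)
--     if top2 == last:
--         return pairings
--     def relabel(r):
--         return last if r == top2 else top2 if r == last else r
--     return sorted(((relabel(r), s, a, b) for (r, s, a, b) in pairings),
--                   key=lambda t: (t[0], t[1]))
-- ===== Notes on version B (the rewrite author's own statement) =====
-- stated objective: simpler
-- what changed: Replaces the defaultdict grouping plus per-round rebuild loop by one linear scan for the top-2 and last round indices followed by a flat relabel of round numbers and a single stable sort keyed on (round, sequence).
import Mathlib
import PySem

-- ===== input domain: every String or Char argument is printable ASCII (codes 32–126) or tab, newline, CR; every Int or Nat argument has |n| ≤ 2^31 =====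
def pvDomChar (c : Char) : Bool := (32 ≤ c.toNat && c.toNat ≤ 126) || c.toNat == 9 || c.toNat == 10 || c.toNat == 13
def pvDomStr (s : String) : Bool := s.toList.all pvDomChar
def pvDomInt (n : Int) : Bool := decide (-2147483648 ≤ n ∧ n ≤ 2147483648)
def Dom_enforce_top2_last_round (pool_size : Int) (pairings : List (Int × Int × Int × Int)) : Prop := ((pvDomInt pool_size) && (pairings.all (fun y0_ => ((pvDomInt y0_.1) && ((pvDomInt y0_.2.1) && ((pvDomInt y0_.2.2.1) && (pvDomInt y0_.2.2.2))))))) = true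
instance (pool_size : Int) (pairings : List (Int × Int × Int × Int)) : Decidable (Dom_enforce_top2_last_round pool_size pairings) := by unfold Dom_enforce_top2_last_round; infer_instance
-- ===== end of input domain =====

-- B replaces A's defaultdict grouping and per-round rebuild by a flat scan for the two round
-- indices plus a single relabel-and-stable-sort over the whole pairing list (objective: simpler).

-- the "(0,1) or (1,0)" matchup test, written identically in both Pythons
def pvMatch (q : Int × Int × Int × Int) : Bool :=
  (q.2.2.1 == 0 && q.2.2.2 == 1) || (q.2.2.1 == 1 && q.2.2.2 == 0)

-- ===== PORT A =====
def enforce_top2_last_round (pool_size : Int) (pairings : List (Int × Int × Int × Int)) : List (Int × Int × Int × Int) :=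
  if pool_size < 2 then pairings
  else
    let rounds : PySem.Dict Int (List (Int × Int × Int × Int)) :=
      pairings.foldl (fun d p => d.modify p.1 [] (fun g => g ++ [p])) PySem.Dict.empty
    -- 'for round_idx, round_pairings in rounds.items(): for … : if match: …; break' = first item whose group has a match
    let round_with_top2 : Option Int :=
      (rounds.items.find? (fun rg => rg.2.any pvMatch)).map (fun rg => rg.1)
    let last_round : Int :=
      match PySem.List.max? rounds.keys (fun k => k) with
      | some m => m
      | none => 1
    match round_with_top2 with
    | none => pairings
    | some rt =>
      if rt == last_round then pairings
      else
        let top2_round_pairings := rounds.getD rt []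
        let last_round_pairings := rounds.getD last_round []
        (PySem.List.sorted rounds.keys (fun k => k) false).foldl (fun result round_idx =>
          if round_idx == rt then
            result ++ (PySem.List.sorted last_round_pairings (fun q => q.2.1) false).map
              (fun q => (round_idx, q.2.1, q.2.2.1, q.2.2.2))
          else if round_idx == last_round then
            result ++ (PySem.List.sorted top2_round_pairings (fun q => q.2.1) false).map
              (fun q => (round_idx, q.2.1, q.2.2.1, q.2.2.2))
          else
            result ++ PySem.List.sorted (rounds.getD round_idx []) (fun q => q.2.1) false) []

-- ===== PORT B =====
def enforce_top2_last_round_alt (pool_size : Int) (pairings : List (Int × Int × Int × Int)) : List (Int × Int × Int × Int) :=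
  if pool_size < 2 then pairings
  else
    let matched : PySem.Set Int :=
      PySem.Set.ofList ((pairings.filter pvMatch).map (fun p => p.1))
    match (pairings.find? (fun p => matched.contains p.1)).map (fun p => p.1) with
    | none => pairings
    | some top2 =>
      match PySem.List.max? (pairings.map (fun p => p.1)) (fun r => r) with
      | none => pairings
      | some last =>
        if top2 == last then pairings
        else
          let relabel : Int → Int := fun r => if r == top2 then last else if r == last then top2 else r
          PySem.List.sorted2 (pairings.map (fun p => (relabel p.1, p.2.1, p.2.2.1, p.2.2.2)))
            (fun q => q.1) (fun q => q.2.1) false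

-- ===== PRECONDITION & SPEC =====
def Spec_enforce_top2_last_round (pool_size : Int) (pairings : List (Int × Int × Int × Int)) (out : List (Int × Int × Int × Int)) : Prop := out = enforce_top2_last_round_alt pool_size pairings
instance (pool_size : Int) (pairings : List (Int × Int × Int × Int)) (out : List (Int × Int × Int × Int)) : Decidable (Spec_enforce_top2_last_round pool_size pairings out) := by unfold Spec_enforce_top2_last_round; infer_instance

-- ===== CLAIM (what is proved, stated in full; the proofs are below) =====
def Claim_equal_enforce_top2_last_round : Prop := ∀ (pool_size : Int) (pairings : List (Int × Int × Int × Int)), Dom_enforce_top2_last_round pool_size pairings → Spec_enforce_top2_last_round pool_size pairings (enforce_top2_last_round pool_size pairings)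

-- ===== LEMMAS AND PROOFS =====


-- generic helper lemmas and proof-only definitions
theorem pv_insertBy_all_true {α : Type} (before : α → α → Bool) (x : α) (l : List α)
    (h : ∀ y ∈ l, before x y = true) : PySem.List.insertBy before x l = x :: l := by
  cases l with
  | nil => simp [PySem.List.insertBy]
  | cons y ys => rw [PySem.List.insertBy]; simp [h y (by simp)]

theorem pv_insertBy_skip {α : Type} (before : α → α → Bool) (x : α) (l1 l2 : List α)
    (h : ∀ y ∈ l1, before x y = false) :
    PySem.List.insertBy before x (l1 ++ l2) = l1 ++ PySem.List.insertBy before x l2 := by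
  induction l1 with
  | nil => simp
  | cons y ys ih =>
    rw [List.cons_append, PySem.List.insertBy]
    simp only [h y (by simp)]
    simp [ih (fun z hz => h z (by simp [hz]))]

theorem pv_insertBy_stop {α : Type} (before : α → α → Bool) (x : α) (l1 l2 : List α)
    (h : ∀ y ∈ l2, before x y = true) :
    PySem.List.insertBy before x (l1 ++ l2) = PySem.List.insertBy before x l1 ++ l2 := by
  induction l1 with
  | nil => simp [pv_insertBy_all_true before x l2 h, PySem.List.insertBy]
  | cons y ys ih =>
    rw [List.cons_append, PySem.List.insertBy]
    by_cases hb : before x y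
    · rw [PySem.List.insertBy]; simp [hb]
    · simp only [hb]; rw [PySem.List.insertBy]; simp [hb, ih]

theorem pv_insertBy_congr {α : Type} (before before' : α → α → Bool) (x : α) (l : List α)
    (h : ∀ y ∈ l, before x y = before' x y) :
    PySem.List.insertBy before x l = PySem.List.insertBy before' x l := by
  induction l with
  | nil => simp [PySem.List.insertBy]
  | cons y ys ih =>
    rw [PySem.List.insertBy]
    conv_rhs => rw [PySem.List.insertBy]
    rw [h y (by simp), ih (fun z hz => h z (by simp [hz]))]

theorem pv_insertBy_map {α β : Type} (g : α → β) (b : β → β → Bool) (b' : α → α → Bool)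
    (x : α) (l : List α) (h : ∀ y, b (g x) (g y) = b' x y) :
    PySem.List.insertBy b (g x) (l.map g) = (PySem.List.insertBy b' x l).map g := by
  induction l with
  | nil => simp [PySem.List.insertBy]
  | cons y ys ih =>
    rw [List.map_cons, PySem.List.insertBy]
    conv_rhs => rw [PySem.List.insertBy]
    rw [h y]
    by_cases hb : b' x y
    · simp [hb]
    · simp [hb, ih]

theorem pv_sorted_snoc {α κ : Type} [LinearOrder κ] (l : List α) (x : α) (key : α → κ) :
    PySem.List.sorted (l ++ [x]) key false
      = PySem.List.insertBy (fun a b => decide (key a < key b)) x (PySem.List.sorted l key false) := by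
  simp [PySem.List.sorted, List.foldl_append]

def pvLexb (a b : Int × Int × Int × Int) : Bool :=
  decide (a.1 < b.1) || !decide (b.1 < a.1) && decide (a.2.1 < b.2.1)

theorem pv_sorted2_eq_foldl (ys : List (Int × Int × Int × Int)) :
    PySem.List.sorted2 ys (fun q => q.1) (fun q => q.2.1) false
      = ys.foldl (fun acc x => PySem.List.insertBy pvLexb x acc) [] := by
  rfl

theorem pv_dedup_snoc {α : Type} [DecidableEq α] (l : List α) (x : α) :
    PySem.List.dedup (l ++ [x])
      = if x ∈ l then PySem.List.dedup l else PySem.List.dedup l ++ [x] := by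
  show PySem.Set.ofList (l ++ [x]) = _
  rw [PySem.Set.ofList, List.foldl_append]
  show PySem.Set.add (PySem.Set.ofList l) x = _
  rw [PySem.Set.add]
  by_cases hx : x ∈ l
  · simp [hx, PySem.Set.mem_ofList]
  · simp [hx, PySem.Set.mem_ofList]

theorem pv_find?_dedup (l : List Int) (q : Int → Bool) :
    (PySem.List.dedup l).find? q = l.find? q := by
  induction l using List.reverseRecOn with
  | nil => rfl
  | append_singleton l x ih =>
    rw [pv_dedup_snoc, List.find?_append]
    by_cases hx : x ∈ l
    · rw [if_pos hx, ih]
      by_cases hq : q x = true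
      · have : (l.find? q).isSome := by
          rw [List.find?_isSome]; exact ⟨x, hx, hq⟩
        cases hfind : l.find? q with
        | none => simp [hfind] at this
        | some a => simp
      · simp [List.find?, hq]
    · rw [if_neg hx, List.find?_append, ih]

theorem pv_max?_dedup (l : List Int) :
    PySem.List.max? (PySem.List.dedup l) (fun k => k) = PySem.List.max? l (fun r => r) := by
  induction l using List.reverseRecOn with
  | nil => rfl
  | append_singleton l x ih =>
    have hsnoc : ∀ (m : List Int) (o : Option Int), PySem.List.max? m (fun k => k) = o →
        PySem.List.max? (m ++ [x]) (fun k => k)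
          = (match o with | none => some x | some a => if a < x then some x else some a) := by
      intro m o ho
      rw [PySem.List.max?, List.foldl_append, List.foldl_cons, List.foldl_nil]
      rw [PySem.List.max?] at ho
      rw [ho]
      cases o <;> rfl
    rw [pv_dedup_snoc]
    by_cases hx : x ∈ l
    · rw [if_pos hx, ih]
      cases hm : PySem.List.max? l (fun r => r) with
      | none =>
        rw [PySem.List.max?_eq_none_iff] at hm
        subst hm; simp at hx
      | some a =>
        rw [hsnoc l (some a) hm]
        have hle := PySem.List.max?_isMax hm x hx
        simp only at hle
        simp only
        rw [if_neg (by omega)]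
    · rw [if_neg hx,
        hsnoc (PySem.List.dedup l) (PySem.List.max? l (fun r => r)) ih,
        hsnoc l (PySem.List.max? l (fun r => r)) rfl]

theorem pv_sorted_map {α β : Type} (g : α → β) (key : β → Int) (l : List α) :
    PySem.List.sorted (l.map g) key false
      = (PySem.List.sorted l (fun a => key (g a)) false).map g := by
  induction l using List.reverseRecOn with
  | nil => rfl
  | append_singleton l x ih =>
    rw [List.map_append, List.map_singleton]
    rw [show PySem.List.sorted (l.map g ++ [g x]) key false
        = PySem.List.insertBy (fun a b => decide (key a < key b)) (g x)
            (PySem.List.sorted (l.map g) key false) from by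
      simp [PySem.List.sorted, List.foldl_append]]
    rw [show PySem.List.sorted (l ++ [x]) (fun a => key (g a)) false
        = PySem.List.insertBy (fun a b => decide (key (g a) < key (g b))) x
            (PySem.List.sorted l (fun a => key (g a)) false) from by
      simp [PySem.List.sorted, List.foldl_append]]
    rw [ih]
    exact pv_insertBy_map g _ _ x _ (fun y => rfl)

theorem pv_eq_of_pairwise_lt (l1 l2 : List Int)
    (h1 : l1.Pairwise (· < ·)) (h2 : l2.Pairwise (· < ·))
    (hm : ∀ x, x ∈ l1 ↔ x ∈ l2) : l1 = l2 := by
  have hp : l1.Perm l2 := by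
    apply List.perm_of_nodup_nodup_toFinset_eq
    · exact h1.imp ne_of_lt
    · exact h2.imp ne_of_lt
    · ext a; simp [hm a]
  exact hp.eq_of_pairwise (fun a b _ _ hab hba => absurd hba (lt_asymm hab)) h1 h2

def pvBlk (ys : List (Int × Int × Int × Int)) (r : Int) : List (Int × Int × Int × Int) :=
  PySem.List.sorted (ys.filter (fun p => p.1 == r)) (fun p => p.2.1) false

theorem pv_keys_eq (xs : List (Int × Int × Int × Int)) :
    (xs.foldl (fun d p => d.modify p.1 [] (fun g => g ++ [p])) PySem.Dict.empty).keys
      = PySem.List.dedup (xs.map (fun p => p.1)) := by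
  rw [PySem.Dict.keys_foldl_modify_key xs (fun p => p.1) [] (fun _ p => (fun g => g ++ [p]))]
  rfl

theorem pv_nodup_keys (xs : List (Int × Int × Int × Int)) :
    (xs.foldl (fun d p => d.modify p.1 [] (fun g => g ++ [p])) PySem.Dict.empty).keys.Nodup := by
  rw [pv_keys_eq]
  exact PySem.List.nodup_dedup _

theorem pv_getD_eq (xs : List (Int × Int × Int × Int)) (r : Int) :
    (xs.foldl (fun d p => d.modify p.1 [] (fun g => g ++ [p])) PySem.Dict.empty).getD r []
      = xs.filter (fun p => p.1 == r) := by
  have hfold : xs.foldl (fun d p => d.modify p.1 [] (fun g => g ++ [p])) PySem.Dict.empty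
      = (xs.map (fun p => (p.1, p))).foldl (fun d q => d.modify q.1 [] (fun g => g ++ [q.2])) PySem.Dict.empty := by
    rw [List.foldl_map]
  rw [hfold, PySem.Dict.getD_foldl_modify_append]
  simp [List.filter_map, Function.comp_def]

theorem pv_detect_A (xs : List (Int × Int × Int × Int)) :
    ((xs.foldl (fun d p => d.modify p.1 [] (fun g => g ++ [p])) PySem.Dict.empty).items.find?
        (fun rg => rg.2.any pvMatch)).map (fun rg => rg.1)
      = ((xs.map (fun p => p.1)).find? (fun r => xs.any (fun p => p.1 == r && pvMatch p))) := by
  rw [PySem.Dict.items_eq_map_keys _ (pv_nodup_keys xs) []]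
  rw [List.find?_map, Option.map_map]
  have h1 : ((fun rg : Int × List (Int × Int × Int × Int) => rg.2.any pvMatch)
      ∘ (fun k => (k, (xs.foldl (fun d p => d.modify p.1 [] (fun g => g ++ [p])) PySem.Dict.empty).getD k [])))
      = (fun r => xs.any (fun p => p.1 == r && pvMatch p)) := by
    funext k
    simp only [Function.comp_apply, pv_getD_eq, List.any_filter]
  rw [h1]
  rw [pv_keys_eq, pv_find?_dedup]
  simp [Function.comp_def]

theorem pv_detect_B (xs : List (Int × Int × Int × Int)) :
    (xs.find? (fun p => (PySem.Set.ofList ((xs.filter pvMatch).map (fun p => p.1))).contains p.1)).map (fun p => p.1)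
      = ((xs.map (fun p => p.1)).find? (fun r => xs.any (fun p => p.1 == r && pvMatch p))) := by
  have h1 : (fun p : Int × Int × Int × Int =>
        (PySem.Set.ofList ((xs.filter pvMatch).map (fun p => p.1))).contains p.1)
      = (fun p => xs.any (fun q => q.1 == p.1 && pvMatch q)) := by
    funext p
    rw [Bool.eq_iff_iff]
    constructor
    · intro hc
      rw [PySem.Set.contains_iff, PySem.Set.mem_ofList] at hc
      obtain ⟨q, hq, hq1⟩ := List.mem_map.mp hc
      rw [List.mem_filter] at hq
      rw [List.any_eq_true]
      exact ⟨q, hq.1, by simp [hq1, hq.2]⟩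
    · intro ha
      rw [List.any_eq_true] at ha
      obtain ⟨q, hq, hqq⟩ := ha
      simp only [Bool.and_eq_true, beq_iff_eq] at hqq
      rw [PySem.Set.contains_iff, PySem.Set.mem_ofList]
      exact List.mem_map.mpr ⟨q, List.mem_filter.mpr ⟨hq, hqq.2⟩, hqq.1⟩
  rw [h1, List.find?_map]
  rfl

theorem pv_mem_blk (ys : List (Int × Int × Int × Int)) (r : Int)
    (p : Int × Int × Int × Int) (hp : p ∈ pvBlk ys r) : p.1 = r := by
  rw [pvBlk, PySem.List.mem_sorted, List.mem_filter] at hp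
  exact beq_iff_eq.mp hp.2

def pvSeqb (a b : Int × Int × Int × Int) : Bool := decide (a.2.1 < b.2.1)
def pvGrouped (ys : List (Int × Int × Int × Int)) : List (Int × Int × Int × Int) :=
  (PySem.List.sorted (PySem.List.dedup (ys.map (fun p => p.1))) (fun r => r) false).flatMap (pvBlk ys)

theorem pv_sorted2_snoc (ys : List (Int × Int × Int × Int)) (x : Int × Int × Int × Int) :
    PySem.List.sorted2 (ys ++ [x]) (fun q => q.1) (fun q => q.2.1) false
      = PySem.List.insertBy pvLexb x (PySem.List.sorted2 ys (fun q => q.1) (fun q => q.2.1) false) := by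
  rw [pv_sorted2_eq_foldl, pv_sorted2_eq_foldl, List.foldl_append, List.foldl_cons, List.foldl_nil]

theorem pv_blk_snoc_same (ys : List (Int × Int × Int × Int)) (x : Int × Int × Int × Int) :
    pvBlk (ys ++ [x]) x.1 = PySem.List.insertBy pvSeqb x (pvBlk ys x.1) := by
  rw [pvBlk, pvBlk, List.filter_append]
  have : List.filter (fun p => p.1 == x.1) [x] = [x] := by simp
  rw [this, pv_sorted_snoc]
  rfl

theorem pv_blk_snoc_ne (ys : List (Int × Int × Int × Int)) (x : Int × Int × Int × Int)
    (r : Int) (hr : r ≠ x.1) : pvBlk (ys ++ [x]) r = pvBlk ys r := by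
  rw [pvBlk, pvBlk, List.filter_append]
  have : List.filter (fun p => p.1 == r) [x] = [] := by simp [Ne.symm hr]
  rw [this, List.append_nil]

theorem pv_blk_new (ys : List (Int × Int × Int × Int)) (x : Int × Int × Int × Int)
    (hx : x.1 ∉ ys.map (fun p => p.1)) : pvBlk (ys ++ [x]) x.1 = [x] := by
  rw [pv_blk_snoc_same]
  have : pvBlk ys x.1 = [] := by
    rw [pvBlk]
    have : List.filter (fun p => p.1 == x.1) ys = [] := by
      rw [List.filter_eq_nil_iff]
      intro p hp hbeq
      exact hx (List.mem_map.mpr ⟨p, hp, beq_iff_eq.mp hbeq⟩)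
    rw [this]; rfl
  rw [this]; rfl

theorem pv_insertBy_sorted_split (r0 : Int) (S : List Int)
    (hPw : S.Pairwise (· < ·)) (hr : r0 ∉ S) :
    ∃ s1 s2, S = s1 ++ s2 ∧
      PySem.List.insertBy (fun a b => decide (a < b)) r0 S = s1 ++ r0 :: s2 ∧
      (∀ a ∈ s1, a < r0) ∧ (∀ a ∈ s2, r0 < a) := by
  induction S with
  | nil => exact ⟨[], [], rfl, rfl, by simp, by simp⟩
  | cons y t ih =>
    have hyt := List.pairwise_cons.mp hPw
    have hyr : y ≠ r0 := fun h => hr (h ▸ List.mem_cons_self)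
    by_cases hlt : r0 < y
    · refine ⟨[], y :: t, rfl, ?_, by simp, ?_⟩
      · rw [PySem.List.insertBy]
        simp [hlt]
      · intro a ha
        rcases List.mem_cons.mp ha with h | h
        · omega
        · exact lt_trans hlt (hyt.1 a h)
    · have hylt : y < r0 := by omega
      obtain ⟨s1, s2, hS, hins, h1, h2⟩ := ih hyt.2 (fun h => hr (List.mem_cons_of_mem _ h))
      refine ⟨y :: s1, s2, by rw [List.cons_append, hS], ?_, ?_, h2⟩
      · rw [PySem.List.insertBy]
        simp only [show decide (r0 < y) = false by simp [hlt]]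
        simp [hins]
      · intro a ha
        rcases List.mem_cons.mp ha with h | h
        · omega
        · exact h1 a h

theorem pv_mem_flatMap_blk (ys : List (Int × Int × Int × Int)) (s : List Int)
    (y : Int × Int × Int × Int) (hy : y ∈ s.flatMap (pvBlk ys)) : ∃ a ∈ s, y.1 = a := by
  obtain ⟨a, ha, hya⟩ := List.mem_flatMap.mp hy
  exact ⟨a, ha, pv_mem_blk ys a y hya⟩

theorem pv_grouped_sort (ys : List (Int × Int × Int × Int)) :
    PySem.List.sorted2 ys (fun q => q.1) (fun q => q.2.1) false = pvGrouped ys := by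
  induction ys using List.reverseRecOn with
  | nil => rfl
  | append_singleton ys x ih =>
    rw [pv_sorted2_snoc, ih]
    set l0 := ys.map (fun p => p.1) with hl0
    have hmapsnoc : (ys ++ [x]).map (fun p => p.1) = l0 ++ [x.1] := by simp [hl0]
    have hPwS : (PySem.List.sorted (PySem.List.dedup l0) (fun r => r) false).Pairwise (· < ·) :=
      PySem.List.sorted_ofList_pairwise_lt l0
    set S := PySem.List.sorted (PySem.List.dedup l0) (fun r => r) false with hS
    by_cases hx : x.1 ∈ l0
    -- existing round: x is inserted, by seq, into the block of round x.1
    · have hgr : pvGrouped (ys ++ [x]) = S.flatMap (pvBlk (ys ++ [x])) := by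
        rw [pvGrouped, hmapsnoc, pv_dedup_snoc, if_pos hx]
      have hxS : x.1 ∈ S := by
        rw [hS, PySem.List.mem_sorted, PySem.List.mem_dedup]; exact hx
      obtain ⟨s1, s2, hsplit⟩ := List.append_of_mem hxS
      have hPw' : (s1 ++ x.1 :: s2).Pairwise (· < ·) := hsplit ▸ hPwS
      have hs1lt : ∀ a ∈ s1, a < x.1 := by
        intro a ha
        exact (List.pairwise_append.mp hPw').2.2 a ha x.1 List.mem_cons_self
      have hs2gt : ∀ a ∈ s2, x.1 < a := by
        intro a ha
        exact (List.pairwise_cons.mp (List.pairwise_append.mp hPw').2.1).1 a ha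
      have hs1ne : ∀ a ∈ s1, a ≠ x.1 := fun a ha => ne_of_lt (hs1lt a ha)
      have hs2ne : ∀ a ∈ s2, a ≠ x.1 := fun a ha => ne_of_gt (hs2gt a ha)
      rw [hgr, hsplit, List.flatMap_append, List.flatMap_cons]
      rw [List.flatMap_congr (fun a ha => pv_blk_snoc_ne ys x a (hs1ne a ha)),
          pv_blk_snoc_same,
          List.flatMap_congr (fun a ha => pv_blk_snoc_ne ys x a (hs2ne a ha))]
      rw [pvGrouped, ← hS, hsplit, List.flatMap_append, List.flatMap_cons]
      rw [pv_insertBy_skip pvLexb x _ _ (by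
        intro y hy
        obtain ⟨a, ha, hya⟩ := pv_mem_flatMap_blk ys s1 y hy
        have := hs1lt a ha
        simp [pvLexb, hya]
        omega)]
      congr 1
      rw [pv_insertBy_stop pvLexb x (pvBlk ys x.1) _ (by
        intro y hy
        obtain ⟨a, ha, hya⟩ := pv_mem_flatMap_blk ys s2 y hy
        have := hs2gt a ha
        simp [pvLexb, hya]
        omega)]
      congr 1
      exact pv_insertBy_congr pvLexb pvSeqb x _ (by
        intro y hy
        have := pv_mem_blk ys x.1 y hy
        simp [pvLexb, pvSeqb, this])
    -- new round: x becomes a singleton block at its sorted position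
    · have hgr : pvGrouped (ys ++ [x]) = (PySem.List.insertBy (fun a b => decide (a < b)) x.1 S).flatMap (pvBlk (ys ++ [x])) := by
        rw [pvGrouped, hmapsnoc, pv_dedup_snoc, if_neg hx, pv_sorted_snoc]
      have hxS : x.1 ∉ S := by
        rw [hS, PySem.List.mem_sorted, PySem.List.mem_dedup]; exact hx
      obtain ⟨s1, s2, hsplit, hins, h1, h2⟩ := pv_insertBy_sorted_split x.1 S hPwS hxS
      have hs1ne : ∀ a ∈ s1, a ≠ x.1 := fun a ha => ne_of_lt (h1 a ha)
      have hs2ne : ∀ a ∈ s2, a ≠ x.1 := fun a ha => ne_of_gt (h2 a ha)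
      rw [hgr, hins, List.flatMap_append, List.flatMap_cons]
      rw [List.flatMap_congr (fun a ha => pv_blk_snoc_ne ys x a (hs1ne a ha)),
          pv_blk_new ys x hx,
          List.flatMap_congr (fun a ha => pv_blk_snoc_ne ys x a (hs2ne a ha))]
      rw [pvGrouped, ← hS, hsplit, List.flatMap_append]
      rw [pv_insertBy_skip pvLexb x _ _ (by
        intro y hy
        obtain ⟨a, ha, hya⟩ := pv_mem_flatMap_blk ys s1 y hy
        have := h1 a ha
        simp [pvLexb, hya]
        omega)]
      rw [pv_insertBy_all_true pvLexb x _ (by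
        intro y hy
        obtain ⟨a, ha, hya⟩ := pv_mem_flatMap_blk ys s2 y hy
        have := h2 a ha
        simp [pvLexb, hya]
        omega)]
      simp

theorem pv_foldl_if3 {α β : Type} (S : List α) (c1 c2 : α → Bool) (f g h : α → List β)
    (init : List β) :
    S.foldl (fun res r => if c1 r then res ++ f r else if c2 r then res ++ g r else res ++ h r) init
      = init ++ S.flatMap (fun r => if c1 r then f r else if c2 r then g r else h r) := by
  induction S generalizing init with
  | nil => simp
  | cons r S ih =>
    rw [List.foldl_cons, List.flatMap_cons]
    by_cases h1 : c1 r
    · simp only [h1, if_true, ih, List.append_assoc]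
    · by_cases h2 : c2 r
      · simp only [h1, h2, if_true, if_false, Bool.false_eq_true, ih, List.append_assoc]
      · simp only [h1, h2, if_false, Bool.false_eq_true, ih, List.append_assoc]

theorem pv_swap (xs : List (Int × Int × Int × Int)) (rt L : Int)
    (hrt : rt ∈ xs.map (fun p => p.1)) (hL : L ∈ xs.map (fun p => p.1)) (hne : rt ≠ L) :
    (PySem.List.sorted (PySem.List.dedup (xs.map (fun p => p.1))) (fun k => k) false).foldl
      (fun result round_idx =>
        if round_idx == rt then
          result ++ (PySem.List.sorted (xs.filter (fun p => p.1 == L)) (fun q => q.2.1) false).map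
            (fun q => (round_idx, q.2.1, q.2.2.1, q.2.2.2))
        else if round_idx == L then
          result ++ (PySem.List.sorted (xs.filter (fun p => p.1 == rt)) (fun q => q.2.1) false).map
            (fun q => (round_idx, q.2.1, q.2.2.1, q.2.2.2))
        else
          result ++ PySem.List.sorted (xs.filter (fun p => p.1 == round_idx)) (fun q => q.2.1) false) []
    = PySem.List.sorted2
        (xs.map (fun p => (if p.1 == rt then L else if p.1 == L then rt else p.1, p.2.1, p.2.2.1, p.2.2.2)))
        (fun q => q.1) (fun q => q.2.1) false := by
  set rel : Int → Int := fun r => if r == rt then L else if r == L then rt else r with hreldef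
  set relT : (Int × Int × Int × Int) → (Int × Int × Int × Int) :=
    fun p => (rel p.1, p.2.1, p.2.2.1, p.2.2.2) with hrelTdef
  have h_rel_rt : rel rt = L := by simp [hreldef]
  have h_rel_L : rel L = rt := by simp [hreldef, Ne.symm hne]
  have h_rel_other : ∀ r, r ≠ rt → r ≠ L → rel r = r := by
    intro r h1 h2; simp [hreldef, h1, h2]
  have h_invol : ∀ r, rel (rel r) = r := by
    intro r
    by_cases h1 : r = rt
    · rw [h1, h_rel_rt, h_rel_L]
    · by_cases h2 : r = L
      · rw [h2, h_rel_L, h_rel_rt]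
      · rw [h_rel_other r h1 h2, h_rel_other r h1 h2]
  have h_mem : ∀ r, r ∈ xs.map (fun p => p.1) → rel r ∈ xs.map (fun p => p.1) := by
    intro r hr
    by_cases h1 : r = rt
    · rw [h1, h_rel_rt]; exact hL
    · by_cases h2 : r = L
      · rw [h2, h_rel_L]; exact hrt
      · rw [h_rel_other r h1 h2]; exact hr
  set ys : List (Int × Int × Int × Int) := xs.map relT with hysdef
  have hysfst : ys.map (fun q => q.1) = (xs.map (fun p => p.1)).map rel := by
    simp [hysdef, List.map_map, Function.comp_def, hrelTdef]
  have h_S : PySem.List.sorted (PySem.List.dedup (ys.map (fun q => q.1))) (fun r => r) false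
      = PySem.List.sorted (PySem.List.dedup (xs.map (fun p => p.1))) (fun k => k) false := by
    apply pv_eq_of_pairwise_lt
    · exact PySem.List.sorted_ofList_pairwise_lt _
    · exact PySem.List.sorted_ofList_pairwise_lt _
    · intro z
      rw [PySem.List.mem_sorted, PySem.List.mem_sorted, PySem.List.mem_dedup, PySem.List.mem_dedup,
        hysfst]
      constructor
      · intro hz
        obtain ⟨w, hw, hwz⟩ := List.mem_map.mp hz
        exact hwz ▸ h_mem w hw
      · intro hz
        exact List.mem_map.mpr ⟨rel z, h_mem z hz, h_invol z⟩
  have h_blk : ∀ r ∈ PySem.List.sorted (PySem.List.dedup (xs.map (fun p => p.1))) (fun k => k) false,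
      (if (r == rt) = true then
          (PySem.List.sorted (xs.filter (fun p => p.1 == L)) (fun q => q.2.1) false).map
            (fun q => (r, q.2.1, q.2.2.1, q.2.2.2))
        else if (r == L) = true then
          (PySem.List.sorted (xs.filter (fun p => p.1 == rt)) (fun q => q.2.1) false).map
            (fun q => (r, q.2.1, q.2.2.1, q.2.2.2))
        else PySem.List.sorted (xs.filter (fun p => p.1 == r)) (fun q => q.2.1) false)
      = pvBlk ys r := by
    intro r _
    have hfil : ys.filter (fun p => p.1 == r) = (xs.filter (fun p => p.1 == rel r)).map relT := by
      rw [hysdef, List.filter_map]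
      congr 1
      apply List.filter_congr
      intro p _
      show ((rel p.1 : Int) == r) = (p.1 == rel r)
      rw [Bool.eq_iff_iff, beq_iff_eq, beq_iff_eq]
      constructor
      · intro h; rw [← h]; exact (h_invol p.1).symm
      · intro h; rw [h]; exact h_invol r
    have hblk : pvBlk ys r
        = (PySem.List.sorted (xs.filter (fun p => p.1 == rel r)) (fun q => q.2.1) false).map relT := by
      rw [pvBlk, hfil, pv_sorted_map relT (fun q => q.2.1)]
    by_cases h1 : r = rt
    · subst h1
      rw [if_pos (by simp), hblk, h_rel_rt]
      apply List.map_congr_left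
      intro q hq
      have hq1 : q.1 = L := by
        rw [PySem.List.mem_sorted, List.mem_filter] at hq
        exact beq_iff_eq.mp hq.2
      show (r, q.2.1, q.2.2.1, q.2.2.2) = relT q
      rw [hrelTdef]
      simp only [hq1, h_rel_L]
    · by_cases h2 : r = L
      · subst h2
        rw [if_neg (by simp [h1]), if_pos (by simp), hblk, h_rel_L]
        apply List.map_congr_left
        intro q hq
        have hq1 : q.1 = rt := by
          rw [PySem.List.mem_sorted, List.mem_filter] at hq
          exact beq_iff_eq.mp hq.2
        show (r, q.2.1, q.2.2.1, q.2.2.2) = relT q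
        rw [hrelTdef]
        simp only [hq1, h_rel_rt]
      · rw [if_neg (by simp [h1]), if_neg (by simp [h2]), hblk, h_rel_other r h1 h2]
        have : ∀ q ∈ PySem.List.sorted (xs.filter (fun p => p.1 == r)) (fun q => q.2.1) false,
            relT q = q := by
          intro q hq
          have hq1 : q.1 = r := by
            rw [PySem.List.mem_sorted, List.mem_filter] at hq
            exact beq_iff_eq.mp hq.2
          rw [hrelTdef]
          show (rel q.1, q.2.1, q.2.2.1, q.2.2.2) = q
          rw [hq1, h_rel_other r h1 h2, ← hq1]
        rw [List.map_congr_left this, List.map_id']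
  have hB : PySem.List.sorted2
        (xs.map (fun p => (if p.1 == rt then L else if p.1 == L then rt else p.1, p.2.1, p.2.2.1, p.2.2.2)))
        (fun q => q.1) (fun q => q.2.1) false = pvGrouped ys := by
    rw [← pv_grouped_sort]
  rw [hB, pvGrouped, h_S, pv_foldl_if3, List.nil_append]
  exact List.flatMap_congr h_blk

theorem pv_main (pool_size : Int) (pairings : List (Int × Int × Int × Int)) :
    enforce_top2_last_round pool_size pairings = enforce_top2_last_round_alt pool_size pairings := by
  by_cases hps : pool_size < 2
  · simp [enforce_top2_last_round, enforce_top2_last_round_alt, hps]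
  · simp only [enforce_top2_last_round, enforce_top2_last_round_alt, if_neg hps]
    rw [pv_detect_A, pv_detect_B, pv_keys_eq, pv_max?_dedup]
    cases hdet : (pairings.map (fun p => p.1)).find?
        (fun r => pairings.any (fun p => p.1 == r && pvMatch p)) with
    | none => rfl
    | some rt =>
      have hrtmem : rt ∈ pairings.map (fun p => p.1) := List.mem_of_find?_eq_some hdet
      cases hmax : PySem.List.max? (pairings.map (fun p => p.1)) (fun r => r) with
      | none =>
        rw [PySem.List.max?_eq_none_iff] at hmax
        rw [hmax] at hrtmem
        simp at hrtmem
      | some L =>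
        have hLmem : L ∈ pairings.map (fun p => p.1) := by
          have := PySem.List.max?_mem hmax
          simpa using this
        simp only []
        by_cases hrL : rt = L
        · simp [hrL]
        · rw [if_neg (show ¬((rt == L) = true) by simp [hrL]),
            if_neg (show ¬((rt == L) = true) by simp [hrL])]
          simp only [pv_getD_eq]
          exact pv_swap pairings rt L hrtmem hLmem hrL

-- ===== VERDICT (by name: the statement is the Claim_ definition above) =====
theorem enforce_top2_last_round_spec : Claim_equal_enforce_top2_last_round := by
  intro ps xs _
  unfold Spec_enforce_top2_last_round
  exact pv_main ps xs
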